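-- pv_equiv track=rewrite | github.com/steffanfelipe-alt/pyme-os-backend | validaciones.py | validar_cuit
-- ===== SOURCE A (Python) =====
-- def validar_cuit(cuit: str) -> bool:
--     """
--     Valida un CUIT/CUIL argentino usando el algoritmo de dígito verificador.
--
--     Multiplicadores: [5, 4, 3, 2, 7, 6, 5, 4, 3, 2]
--     Dígito verificador = 11 - (suma % 11)
--     Si resultado es 11 → dígito = 0. Si es 10 → CUIT inválido.
--     """
--     limpio = cuit.replace("-", "").replace(" ", "")
--
--     if len(limpio) != 11 or not limpio.isdigit():
--         return False
--
--     multiplicadores = [5, 4, 3, 2, 7, 6, 5, 4, 3, 2]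
--     suma = sum(int(limpio[i]) * multiplicadores[i] for i in range(10))
--     resto = suma % 11
--     verificador = 11 - resto
--
--     if verificador == 11:
--         verificador = 0
--     elif verificador == 10:
--         return False
--
--     return verificador == int(limpio[10])
-- ===== SOURCE B (Python) =====
-- def validar_cuit(cuit: str) -> bool:
--     limpio = cuit.replace("-", "").replace(" ", "")
--
--     if len(limpio) != 11 or not limpio.isdigit():
--         return False
--
--     # fold the check digit in with weight 1: valid iff the full weighted sum is divisible by 11
--     pesos = [5, 4, 3, 2, 7, 6, 5, 4, 3, 2, 1]
--     total = sum(int(c) * p for c, p in zip(limpio, pesos))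
--     return total % 11 == 0
-- ===== Notes on version B (the rewrite author's own statement) =====
-- stated objective: simpler
-- what changed: B folds the check digit into the weighted sum with weight 1 (zip over the string, weights [5,4,3,2,7,6,5,4,3,2,1]) and tests total % 11 == 0, eliminating the 11-suma%11 computation and the 11->0 / 10->invalid branches.
import Mathlib
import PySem

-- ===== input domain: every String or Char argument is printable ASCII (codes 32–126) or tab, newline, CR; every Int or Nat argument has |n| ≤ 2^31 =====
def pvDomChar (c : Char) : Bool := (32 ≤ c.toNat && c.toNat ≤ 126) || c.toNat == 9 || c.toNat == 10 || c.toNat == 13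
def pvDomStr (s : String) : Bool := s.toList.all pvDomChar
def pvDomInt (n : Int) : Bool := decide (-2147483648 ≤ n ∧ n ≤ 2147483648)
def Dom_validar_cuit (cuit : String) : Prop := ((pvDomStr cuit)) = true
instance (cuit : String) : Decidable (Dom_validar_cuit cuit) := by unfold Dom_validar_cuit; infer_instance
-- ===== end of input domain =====

-- B folds the check digit into the weighted sum (weight 1) and tests divisibility by 11,
-- eliminating A's `11 - suma % 11` verifier and its 11→0 / 10→invalid branches (objective: simpler).

-- ===== PORT A =====
-- limpio[i] / multiplicadores[i] are always in range here (length checked = 11, i ≤ 10) and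
-- int(limpio[i]) never raises (isdigit checked), so the `.getD` defaults are unreachable.
def validar_cuit (cuit : String) : Bool :=
  let limpio := PySem.Chars.replace (PySem.Chars.replace cuit.toList ['-'] []) [' '] []
  if limpio.length ≠ 11 ∨ PySem.Chars.strIsdigit limpio = false then false
  else
    let mult : List Int := [5, 4, 3, 2, 7, 6, 5, 4, 3, 2]
    let suma : Int := ((PySem.List.pyRange 0 10 1).map (fun i =>
      (PySem.Int.ofChars? [(PySem.List.pyGet? limpio i).getD ' ']).getD 0 *
      (PySem.List.pyGet? mult i).getD 0)).sum
    let resto := PySem.Int.mod suma 11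
    let verificador := 11 - resto
    if verificador = 11 then
      decide ((0 : Int) = (PySem.Int.ofChars? [(PySem.List.pyGet? limpio 10).getD ' ']).getD 0)
    else if verificador = 10 then false
    else
      decide (verificador = (PySem.Int.ofChars? [(PySem.List.pyGet? limpio 10).getD ' ']).getD 0)

-- ===== PORT B =====
def validar_cuit_alt (cuit : String) : Bool :=
  let limpio := PySem.Chars.replace (PySem.Chars.replace cuit.toList ['-'] []) [' '] []
  if limpio.length ≠ 11 ∨ PySem.Chars.strIsdigit limpio = false then false
  else
    let pesos : List Int := [5, 4, 3, 2, 7, 6, 5, 4, 3, 2, 1]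
    let total : Int := ((limpio.zip pesos).map (fun cp =>
      (PySem.Int.ofChars? [cp.1]).getD 0 * cp.2)).sum
    decide (PySem.Int.mod total 11 = 0)

-- ===== PRECONDITION & SPEC =====
def Spec_validar_cuit (cuit : String) (out : Bool) : Prop := out = validar_cuit_alt cuit
instance (cuit : String) (out : Bool) : Decidable (Spec_validar_cuit cuit out) := by unfold Spec_validar_cuit; infer_instance

-- ===== CLAIM (what is proved, stated in full; the proofs are below) =====
def Claim_equal_validar_cuit : Prop := ∀ (cuit : String), Dom_validar_cuit cuit → Spec_validar_cuit cuit (validar_cuit cuit)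

-- ===== LEMMAS AND PROOFS =====

lemma char_eq_of_toNat_eq {c d : Char} (h : c.toNat = d.toNat) : c = d :=
  Char.ext (UInt32.toNat_inj.mp h)

lemma digit_cases (c : Char) (h : PySem.Chars.isdigit c = true) :
    c = '0' ∨ c = '1' ∨ c = '2' ∨ c = '3' ∨ c = '4' ∨ c = '5' ∨ c = '6' ∨ c = '7' ∨ c = '8' ∨ c = '9' := by
  simp only [PySem.Chars.isdigit, Bool.and_eq_true, decide_eq_true_eq] at h
  obtain ⟨h1, h2⟩ := h
  have hl : 48 ≤ c.toNat := h1
  have hr : c.toNat ≤ 57 := h2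
  interval_cases h : c.toNat
  · exact Or.inl (char_eq_of_toNat_eq h)
  · exact Or.inr (Or.inl (char_eq_of_toNat_eq h))
  · exact Or.inr (Or.inr (Or.inl (char_eq_of_toNat_eq h)))
  · exact Or.inr (Or.inr (Or.inr (Or.inl (char_eq_of_toNat_eq h))))
  · exact Or.inr (Or.inr (Or.inr (Or.inr (Or.inl (char_eq_of_toNat_eq h)))))
  · exact Or.inr (Or.inr (Or.inr (Or.inr (Or.inr (Or.inl (char_eq_of_toNat_eq h))))))
  · exact Or.inr (Or.inr (Or.inr (Or.inr (Or.inr (Or.inr (Or.inl (char_eq_of_toNat_eq h)))))))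
  · exact Or.inr (Or.inr (Or.inr (Or.inr (Or.inr (Or.inr (Or.inr (Or.inl (char_eq_of_toNat_eq h))))))))
  · exact Or.inr (Or.inr (Or.inr (Or.inr (Or.inr (Or.inr (Or.inr (Or.inr (Or.inl (char_eq_of_toNat_eq h)))))))))
  · exact Or.inr (Or.inr (Or.inr (Or.inr (Or.inr (Or.inr (Or.inr (Or.inr (Or.inr (char_eq_of_toNat_eq h)))))))))

-- int(c) of a digit character lies in [0, 9]
lemma digit_val_bounds (c : Char) (h : PySem.Chars.isdigit c = true) :
    0 ≤ (PySem.Int.ofChars? [c]).getD 0 ∧ (PySem.Int.ofChars? [c]).getD 0 ≤ 9 := by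
  rcases digit_cases c h with rfl|rfl|rfl|rfl|rfl|rfl|rfl|rfl|rfl|rfl <;> decide

-- ===== VERDICT (by name: the statement is the Claim_ definition above) =====
theorem validar_cuit_spec : Claim_equal_validar_cuit := by
  intro cuit _
  simp only [Spec_validar_cuit, validar_cuit, validar_cuit_alt]
  generalize PySem.Chars.replace (PySem.Chars.replace cuit.toList ['-'] []) [' '] [] = L
  by_cases hg : L.length ≠ 11 ∨ PySem.Chars.strIsdigit L = false
  · rw [if_pos hg, if_pos hg]
  · rw [if_neg hg, if_neg hg]
    push_neg at hg
    obtain ⟨hlen, hdig'⟩ := hg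
    have hdig : PySem.Chars.strIsdigit L = true := Bool.ne_false_iff.mp hdig'
    rcases L with _|⟨c0, _|⟨c1, _|⟨c2, _|⟨c3, _|⟨c4, _|⟨c5, _|⟨c6, _|⟨c7, _|⟨c8, _|⟨c9, _|⟨c10, rest⟩⟩⟩⟩⟩⟩⟩⟩⟩⟩⟩ <;>
      try simp at hlen
    obtain rfl : rest = [] := by simpa using hlen
    have hc10 : PySem.Chars.isdigit c10 = true := by
      simp [PySem.Chars.strIsdigit] at hdig; tauto
    have hR : PySem.List.pyRange 0 10 1 = [0,1,2,3,4,5,6,7,8,9] := by decide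
    simp [hR, List.zip, PySem.List.pyGet?, PySem.List.pyIdx?]
    have hd := digit_val_bounds c10 hc10
    generalize (PySem.Int.ofChars? [c10]).getD 0 = d10 at hd ⊢
    obtain ⟨hd0, hd9⟩ := hd
    rw [Bool.eq_iff_iff]
    split_ifs with h <;>
      simp only [decide_eq_true_eq, Bool.and_eq_true, Bool.not_eq_true', decide_eq_false_iff_not] <;>
      omega
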